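-- pv_equiv track=rewrite | github.com/rajesh241/libtech | mahabubnagar/grievanceCallProcess.py | htmlUnescape
-- ===== SOURCE A (Python) =====
-- def htmlUnescape(s):
--   """
--   Returns the ASCII decoded version of the given HTML string. This does
--   NOT remove normal HTML tags like <p>.
--   """
--   htmlCodes = (
--       ("'", '&#39;'),
--       ('"', '&quot;'),
--       ('>', '&gt;'),
--       ('<', '&lt;'),
--       ('&', '&amp;')
--     )
--   for code in htmlCodes:
--     s = s.replace(code[1], code[0])
--   return s
-- ===== SOURCE B (Python) =====
-- def htmlUnescape(s):
--   """Single left-to-right scan with an entity table instead of five full-string passes."""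
--   table = (('&#39;', "'"), ('&quot;', '"'), ('&gt;', '>'), ('&lt;', '<'), ('&amp;', '&'))
--   out = []
--   i = 0
--   n = len(s)
--   while i < n:
--     if s[i] == '&':
--       for ent, ch in table:
--         if s.startswith(ent, i):
--           out.append(ch)
--           i += len(ent)
--           break
--       else:
--         out.append('&')
--         i += 1
--     else:
--       out.append(s[i])
--       i += 1
--   return ''.join(out)
-- ===== Notes on version B (the rewrite author's own statement) =====
-- stated objective: alternative
-- what changed: Replaced five sequential full-string replace passes by a single left-to-right scan that looks up the five entities in a table at each ampersand character.
import Mathlib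
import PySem

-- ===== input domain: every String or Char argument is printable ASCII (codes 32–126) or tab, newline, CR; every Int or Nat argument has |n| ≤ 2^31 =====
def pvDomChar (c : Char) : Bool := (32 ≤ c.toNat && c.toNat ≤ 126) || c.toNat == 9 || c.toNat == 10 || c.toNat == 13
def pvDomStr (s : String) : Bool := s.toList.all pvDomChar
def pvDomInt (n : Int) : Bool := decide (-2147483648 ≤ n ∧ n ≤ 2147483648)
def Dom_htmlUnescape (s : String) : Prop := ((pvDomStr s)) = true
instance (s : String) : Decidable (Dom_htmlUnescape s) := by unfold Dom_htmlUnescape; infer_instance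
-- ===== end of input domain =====

-- B replaces A's five sequential full-string replace passes by a single left-to-right
-- table-driven scan; proved to return the same string on every input (alternative, not claimed faster).


-- ===== PORT A =====
-- A: five sequential full-string replace passes, in A's tuple order.
def htmlUnescape (s : String) : String :=
  let s := PySem.Str.replace s "&#39;" "'"
  let s := PySem.Str.replace s "&quot;" "\""
  let s := PySem.Str.replace s "&gt;" ">"
  let s := PySem.Str.replace s "&lt;" "<"
  let s := PySem.Str.replace s "&amp;" "&"
  s

-- ===== PORT B =====
-- B's scan ported on the character list: at each position, if the char is '&' try the five
-- entities in table order (s.startswith(ent, i)); on a match emit the mapped char and skip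
-- the entity, else emit the char and advance.  Exact port of Source B's while-loop.
def pvScan : List Char → List Char
  | [] => []
  | c :: t =>
    if c = '&' then
      if List.isPrefixOf ['&', '#', '3', '9', ';'] (c :: t) then '\'' :: pvScan (List.drop 4 t)
      else if List.isPrefixOf ['&', 'q', 'u', 'o', 't', ';'] (c :: t) then '"' :: pvScan (List.drop 5 t)
      else if List.isPrefixOf ['&', 'g', 't', ';'] (c :: t) then '>' :: pvScan (List.drop 3 t)
      else if List.isPrefixOf ['&', 'l', 't', ';'] (c :: t) then '<' :: pvScan (List.drop 3 t)
      else if List.isPrefixOf ['&', 'a', 'm', 'p', ';'] (c :: t) then '&' :: pvScan (List.drop 4 t)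
      else '&' :: pvScan t
    else c :: pvScan t
termination_by l => l.length
decreasing_by all_goals simp [List.length_drop]

def htmlUnescape_alt (s : String) : String := String.ofList (pvScan s.toList)

-- ===== PRECONDITION & SPEC =====
def Spec_htmlUnescape (s : String) (out : String) : Prop := out = htmlUnescape_alt s
instance (s : String) (out : String) : Decidable (Spec_htmlUnescape s out) := by unfold Spec_htmlUnescape; infer_instance

-- ===== CLAIM (what is proved, stated in full; the proofs are below) =====
def Claim_equal_htmlUnescape : Prop := ∀ (s : String), Dom_htmlUnescape s → Spec_htmlUnescape s (htmlUnescape s)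

-- ===== LEMMAS AND PROOFS =====

-- `repl o os new` is the list-level form of Python's s.replace(o::os, new) (PySem.Chars.replace with a nonempty needle).
def repl (o : Char) (os new : List Char) : List Char → List Char
  | [] => []
  | c :: t =>
    if List.isPrefixOf (o :: os) (c :: t) then new ++ repl o os new (List.drop os.length t)
    else c :: repl o os new t
termination_by l => l.length
decreasing_by all_goals simp [List.length_drop]

lemma repl_nil (o : Char) (os new : List Char) : repl o os new [] = [] := by rw [repl]

lemma repl_cons (o : Char) (os new : List Char) (c : Char) (t : List Char) :
    repl o os new (c :: t) =
      if List.isPrefixOf (o :: os) (c :: t) then new ++ repl o os new (List.drop os.length t)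
      else c :: repl o os new t := by rw [repl]

lemma repl_cons_ne (o : Char) (os new : List Char) (c : Char) (t : List Char) (h : c ≠ o) :
    repl o os new (c :: t) = c :: repl o os new t := by
  rw [repl_cons]
  simp [List.isPrefixOf]
  intro he; exact absurd he.symm h

lemma prefix_repl (o : Char) (os : List Char) (n : Char) :
    ∀ (x pat : List Char), n ∉ pat → pat <+: repl o os [n] x → pat <+: x := by
  intro x
  induction x with
  | nil => intro pat _ h; simpa [repl_nil] using h
  | cons c t ih =>
    intro pat hn h
    rw [repl_cons] at h
    match pat with
    | [] => exact List.nil_prefix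
    | p :: ps =>
      split at h
      · rcases List.cons_prefix_cons.mp h with ⟨hp, _⟩
        exact absurd (hp ▸ List.mem_cons_self) hn
      · rcases List.cons_prefix_cons.mp h with ⟨hp, hps⟩
        have := ih ps (fun hm => hn (List.mem_cons_of_mem _ hm)) hps
        exact hp ▸ List.cons_prefix_cons.mpr ⟨rfl, this⟩

-- match lemmas
lemma M1 (t : List Char) : repl '&' ['#','3','9',';'] ['\''] ('&'::'#'::'3'::'9'::';'::t) = '\'' :: repl '&' ['#','3','9',';'] ['\''] t := by
  rw [repl_cons]; simp [List.isPrefixOf]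
lemma M2 (t : List Char) : repl '&' ['q','u','o','t',';'] ['"'] ('&'::'q'::'u'::'o'::'t'::';'::t) = '"' :: repl '&' ['q','u','o','t',';'] ['"'] t := by
  rw [repl_cons]; simp [List.isPrefixOf]
lemma M3 (t : List Char) : repl '&' ['g','t',';'] ['>'] ('&'::'g'::'t'::';'::t) = '>' :: repl '&' ['g','t',';'] ['>'] t := by
  rw [repl_cons]; simp [List.isPrefixOf]
lemma M4 (t : List Char) : repl '&' ['l','t',';'] ['<'] ('&'::'l'::'t'::';'::t) = '<' :: repl '&' ['l','t',';'] ['<'] t := by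
  rw [repl_cons]; simp [List.isPrefixOf]
lemma M5 (t : List Char) : repl '&' ['a','m','p',';'] ['&'] ('&'::'a'::'m'::'p'::';'::t) = '&' :: repl '&' ['a','m','p',';'] ['&'] t := by
  rw [repl_cons]; simp [List.isPrefixOf]

-- pass-through lemmas: an earlier replace leaves a later entity untouched
lemma P12 (t : List Char) : repl '&' ['#','3','9',';'] ['\''] ('&'::'q'::'u'::'o'::'t'::';'::t) = '&'::'q'::'u'::'o'::'t'::';':: repl '&' ['#','3','9',';'] ['\''] t := by
  simp [repl_cons, List.isPrefixOf]
lemma P13 (t : List Char) : repl '&' ['#','3','9',';'] ['\''] ('&'::'g'::'t'::';'::t) = '&'::'g'::'t'::';':: repl '&' ['#','3','9',';'] ['\''] t := by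
  simp [repl_cons, List.isPrefixOf]
lemma P14 (t : List Char) : repl '&' ['#','3','9',';'] ['\''] ('&'::'l'::'t'::';'::t) = '&'::'l'::'t'::';':: repl '&' ['#','3','9',';'] ['\''] t := by
  simp [repl_cons, List.isPrefixOf]
lemma P15 (t : List Char) : repl '&' ['#','3','9',';'] ['\''] ('&'::'a'::'m'::'p'::';'::t) = '&'::'a'::'m'::'p'::';':: repl '&' ['#','3','9',';'] ['\''] t := by
  simp [repl_cons, List.isPrefixOf]
lemma P23 (t : List Char) : repl '&' ['q','u','o','t',';'] ['"'] ('&'::'g'::'t'::';'::t) = '&'::'g'::'t'::';':: repl '&' ['q','u','o','t',';'] ['"'] t := by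
  simp [repl_cons, List.isPrefixOf]
lemma P24 (t : List Char) : repl '&' ['q','u','o','t',';'] ['"'] ('&'::'l'::'t'::';'::t) = '&'::'l'::'t'::';':: repl '&' ['q','u','o','t',';'] ['"'] t := by
  simp [repl_cons, List.isPrefixOf]
lemma P25 (t : List Char) : repl '&' ['q','u','o','t',';'] ['"'] ('&'::'a'::'m'::'p'::';'::t) = '&'::'a'::'m'::'p'::';':: repl '&' ['q','u','o','t',';'] ['"'] t := by
  simp [repl_cons, List.isPrefixOf]
lemma P34 (t : List Char) : repl '&' ['g','t',';'] ['>'] ('&'::'l'::'t'::';'::t) = '&'::'l'::'t'::';':: repl '&' ['g','t',';'] ['>'] t := by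
  simp [repl_cons, List.isPrefixOf]
lemma P35 (t : List Char) : repl '&' ['g','t',';'] ['>'] ('&'::'a'::'m'::'p'::';'::t) = '&'::'a'::'m'::'p'::';':: repl '&' ['g','t',';'] ['>'] t := by
  simp [repl_cons, List.isPrefixOf]
lemma P45 (t : List Char) : repl '&' ['l','t',';'] ['<'] ('&'::'a'::'m'::'p'::';'::t) = '&'::'a'::'m'::'p'::';':: repl '&' ['l','t',';'] ['<'] t := by
  simp [repl_cons, List.isPrefixOf]

lemma go_eq (o : Char) (os new : List Char) : ∀ (fuel : Nat) (l acc : List Char), l.length ≤ fuel →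
    PySem.Chars.replace.go (o :: os) new fuel l acc = acc.reverse ++ repl o os new l := by
  intro fuel
  induction fuel with
  | zero =>
    intro l acc h
    have : l = [] := List.eq_nil_of_length_eq_zero (Nat.le_zero.mp h)
    subst this; simp [PySem.Chars.replace.go, repl_nil]
  | succ n ih =>
    intro l acc h
    match l with
    | [] => simp [PySem.Chars.replace.go, repl_nil]
    | c :: t =>
      rw [PySem.Chars.replace.go, repl_cons]
      by_cases hp : List.isPrefixOf (o :: os) (c :: t)
      · simp only [hp, if_true]
        rw [ih]
        · simp
        · simp at h ⊢
          have := List.length_drop (l := t) (i := os.length)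
          omega
      · simp only [hp]
        have h' : t.length ≤ n := by simp at h; omega
        rw [ih t (c :: acc) h']
        simp

lemma replace_eq (o : Char) (os new l : List Char) :
    PySem.Chars.replace l (o :: os) new = repl o os new l := by
  rw [PySem.Chars.replace]
  simp [go_eq o os new l.length l [] (le_refl _)]

lemma chain : ∀ (nn : Nat) (cs : List Char), cs.length ≤ nn →
    repl '&' ['a','m','p',';'] ['&'] (repl '&' ['l','t',';'] ['<'] (repl '&' ['g','t',';'] ['>']
      (repl '&' ['q','u','o','t',';'] ['"'] (repl '&' ['#','3','9',';'] ['\''] cs)))) = pvScan cs := by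
  intro nn
  induction nn with
  | zero =>
    intro cs h
    have : cs = [] := List.eq_nil_of_length_eq_zero (Nat.le_zero.mp h)
    subst this; simp [repl_nil, pvScan]
  | succ n ih =>
    intro cs h
    match cs with
    | [] => simp [repl_nil, pvScan]
    | c :: t =>
      by_cases hc : c = '&'
      · subst hc
        by_cases h1 : ['&','#','3','9',';'] <+: ('&'::t)
        · obtain ⟨t1, ht⟩ := h1
          have ht' : t = '#'::'3'::'9'::';'::t1 := by
            have := ht.symm; simpa using this
          subst ht'
          rw [M1,
            repl_cons_ne '&' ['q','u','o','t',';'] ['"'] '\'' _ (by decide),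
            repl_cons_ne '&' ['g','t',';'] ['>'] '\'' _ (by decide),
            repl_cons_ne '&' ['l','t',';'] ['<'] '\'' _ (by decide),
            repl_cons_ne '&' ['a','m','p',';'] ['&'] '\'' _ (by decide),
            ih t1 (by simp at h; omega)]
          rw [pvScan]; simp [List.isPrefixOf]
        · by_cases h2 : ['&','q','u','o','t',';'] <+: ('&'::t)
          · obtain ⟨t1, ht⟩ := h2
            have ht' : t = 'q'::'u'::'o'::'t'::';'::t1 := by
              have := ht.symm; simpa using this
            subst ht'
            rw [P12, M2,
              repl_cons_ne '&' ['g','t',';'] ['>'] '"' _ (by decide),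
              repl_cons_ne '&' ['l','t',';'] ['<'] '"' _ (by decide),
              repl_cons_ne '&' ['a','m','p',';'] ['&'] '"' _ (by decide),
              ih t1 (by simp at h; omega)]
            rw [pvScan]; simp [List.isPrefixOf]
          · by_cases h3 : ['&','g','t',';'] <+: ('&'::t)
            · obtain ⟨t1, ht⟩ := h3
              have ht' : t = 'g'::'t'::';'::t1 := by
                have := ht.symm; simpa using this
              subst ht'
              rw [P13, P23, M3,
                repl_cons_ne '&' ['l','t',';'] ['<'] '>' _ (by decide),
                repl_cons_ne '&' ['a','m','p',';'] ['&'] '>' _ (by decide),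
                ih t1 (by simp at h; omega)]
              rw [pvScan]; simp [List.isPrefixOf]
            · by_cases h4 : ['&','l','t',';'] <+: ('&'::t)
              · obtain ⟨t1, ht⟩ := h4
                have ht' : t = 'l'::'t'::';'::t1 := by
                  have := ht.symm; simpa using this
                subst ht'
                rw [P14, P24, P34, M4,
                  repl_cons_ne '&' ['a','m','p',';'] ['&'] '<' _ (by decide),
                  ih t1 (by simp at h; omega)]
                rw [pvScan]; simp [List.isPrefixOf]
              · by_cases h5 : ['&','a','m','p',';'] <+: ('&'::t)
                · obtain ⟨t1, ht⟩ := h5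
                  have ht' : t = 'a'::'m'::'p'::';'::t1 := by
                    have := ht.symm; simpa using this
                  subst ht'
                  rw [P15, P25, P35, P45, M5,
                    ih t1 (by simp at h; omega)]
                  rw [pvScan]; simp [List.isPrefixOf]
                · -- '&' matched by no entity: every stage passes it through
                  have g2 : ¬ (['&','q','u','o','t',';'] <+: ('&' :: repl '&' ['#','3','9',';'] ['\''] t)) := by
                    intro hp; apply h2
                    rcases List.cons_prefix_cons.mp hp with ⟨_, hps⟩
                    exact List.cons_prefix_cons.mpr ⟨rfl, prefix_repl _ _ _ t _ (by decide) hps⟩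
                  have g3 : ¬ (['&','g','t',';'] <+: ('&' :: repl '&' ['q','u','o','t',';'] ['"'] (repl '&' ['#','3','9',';'] ['\''] t))) := by
                    intro hp; apply h3
                    rcases List.cons_prefix_cons.mp hp with ⟨_, hps⟩
                    exact List.cons_prefix_cons.mpr ⟨rfl,
                      prefix_repl _ _ _ t _ (by decide) (prefix_repl _ _ _ _ _ (by decide) hps)⟩
                  have g4 : ¬ (['&','l','t',';'] <+: ('&' :: repl '&' ['g','t',';'] ['>'] (repl '&' ['q','u','o','t',';'] ['"'] (repl '&' ['#','3','9',';'] ['\''] t)))) := by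
                    intro hp; apply h4
                    rcases List.cons_prefix_cons.mp hp with ⟨_, hps⟩
                    exact List.cons_prefix_cons.mpr ⟨rfl,
                      prefix_repl _ _ _ t _ (by decide)
                        (prefix_repl _ _ _ _ _ (by decide) (prefix_repl _ _ _ _ _ (by decide) hps))⟩
                  have g5 : ¬ (['&','a','m','p',';'] <+: ('&' :: repl '&' ['l','t',';'] ['<'] (repl '&' ['g','t',';'] ['>'] (repl '&' ['q','u','o','t',';'] ['"'] (repl '&' ['#','3','9',';'] ['\''] t))))) := by
                    intro hp; apply h5
                    rcases List.cons_prefix_cons.mp hp with ⟨_, hps⟩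
                    exact List.cons_prefix_cons.mpr ⟨rfl,
                      prefix_repl _ _ _ t _ (by decide)
                        (prefix_repl _ _ _ _ _ (by decide)
                          (prefix_repl _ _ _ _ _ (by decide) (prefix_repl _ _ _ _ _ (by decide) hps)))⟩
                  rw [repl_cons]
                  rw [if_neg (by simpa [List.isPrefixOf_iff_prefix] using h1)]
                  rw [repl_cons '&' ['q','u','o','t',';'] ['"'] '&' _]
                  rw [if_neg (by simpa [List.isPrefixOf_iff_prefix] using g2)]
                  rw [repl_cons '&' ['g','t',';'] ['>'] '&' _]
                  rw [if_neg (by simpa [List.isPrefixOf_iff_prefix] using g3)]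
                  rw [repl_cons '&' ['l','t',';'] ['<'] '&' _]
                  rw [if_neg (by simpa [List.isPrefixOf_iff_prefix] using g4)]
                  rw [repl_cons '&' ['a','m','p',';'] ['&'] '&' _]
                  rw [if_neg (by simpa [List.isPrefixOf_iff_prefix] using g5)]
                  rw [ih t (by simp at h; omega)]
                  have k1 : ¬ (['#','3','9',';'] <+: t) := fun hp => h1 (List.cons_prefix_cons.mpr ⟨rfl, hp⟩)
                  have k2 : ¬ (['q','u','o','t',';'] <+: t) := fun hp => h2 (List.cons_prefix_cons.mpr ⟨rfl, hp⟩)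
                  have k3 : ¬ (['g','t',';'] <+: t) := fun hp => h3 (List.cons_prefix_cons.mpr ⟨rfl, hp⟩)
                  have k4 : ¬ (['l','t',';'] <+: t) := fun hp => h4 (List.cons_prefix_cons.mpr ⟨rfl, hp⟩)
                  have k5 : ¬ (['a','m','p',';'] <+: t) := fun hp => h5 (List.cons_prefix_cons.mpr ⟨rfl, hp⟩)
                  simp [List.isPrefixOf_iff_prefix, k1, k2, k3, k4, k5, pvScan]
      · rw [repl_cons_ne '&' ['#','3','9',';'] ['\''] c t hc,
          repl_cons_ne '&' ['q','u','o','t',';'] ['"'] c _ hc,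
          repl_cons_ne '&' ['g','t',';'] ['>'] c _ hc,
          repl_cons_ne '&' ['l','t',';'] ['<'] c _ hc,
          repl_cons_ne '&' ['a','m','p',';'] ['&'] c _ hc,
          ih t (by simp at h; omega)]
        rw [pvScan]; simp [hc]


-- ===== VERDICT (by name: the statement is the Claim_ definition above) =====
theorem htmlUnescape_spec : Claim_equal_htmlUnescape := by
  intro s _
  unfold Spec_htmlUnescape htmlUnescape htmlUnescape_alt
  have h : (PySem.Str.replace (PySem.Str.replace (PySem.Str.replace (PySem.Str.replace
      (PySem.Str.replace s "&#39;" "'") "&quot;" "\"") "&gt;" ">") "&lt;" "<") "&amp;" "&").toList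
      = (String.ofList (pvScan s.toList)).toList := by
    simp only [PySem.Str.toList_replace]
    show PySem.Chars.replace (PySem.Chars.replace (PySem.Chars.replace (PySem.Chars.replace
      (PySem.Chars.replace s.toList ['&','#','3','9',';'] ['\''])
      ['&','q','u','o','t',';'] ['"']) ['&','g','t',';'] ['>']) ['&','l','t',';'] ['<'])
      ['&','a','m','p',';'] ['&'] = _
    rw [replace_eq, replace_eq, replace_eq, replace_eq, replace_eq,
      chain s.toList.length s.toList (le_refl _)]
    simp
  exact String.toList_inj.mp h
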